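-- pv_equiv track=rewrite | github.com/leanprover-community/mathlib4 | scripts/mdformat_docstrings.py | drop_new_escaped_brackets
-- ===== SOURCE A (Python) =====
-- def drop_new_escaped_brackets(original: str, formatted: str) -> str:
--     def drop_extra(text: str, esc: str, plain: str, keep_count: int) -> str:
--         i = 0
--         out_parts: list[str] = []
--         while i < len(text):
--             if text.startswith(esc, i):
--                 if keep_count > 0:
--                     out_parts.append(esc)
--                     keep_count -= 1
--                 else:
--                     out_parts.append(plain)
--                 i += len(esc)
--             else:
--                 out_parts.append(text[i])
--                 i += 1
--         return "".join(out_parts)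
--
--     out = formatted
--     out = drop_extra(out, r"\[", "[", original.count(r"\["))
--     out = drop_extra(out, r"\]", "]", original.count(r"\]"))
--     return out
-- ===== SOURCE B (Python) =====
-- def drop_new_escaped_brackets(original: str, formatted: str) -> str:
--     def convert(text: str, esc: str, plain: str, keep_count: int) -> str:
--         # keep the first keep_count occurrences of esc, bulk-replace the rest
--         if keep_count <= 0:
--             return text.replace(esc, plain)
--         j = text.find(esc)
--         if j == -1:
--             return text
--         cut = j + len(esc)
--         return text[:cut] + convert(text[cut:], esc, plain, keep_count - 1)
--
--     out = convert(formatted, "\\[", "[", original.count("\\["))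
--     return convert(out, "\\]", "]", original.count("\\]"))
-- ===== Notes on version B (the rewrite author's own statement) =====
-- stated objective: faster
-- what changed: Replaced A's per-character scan with a keep-counter by a recursion on the keep count that locates each kept escape with str.find and bulk-converts the remaining tail with str.replace, doing the bulk of the work in C-level string primitives.
import Mathlib
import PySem

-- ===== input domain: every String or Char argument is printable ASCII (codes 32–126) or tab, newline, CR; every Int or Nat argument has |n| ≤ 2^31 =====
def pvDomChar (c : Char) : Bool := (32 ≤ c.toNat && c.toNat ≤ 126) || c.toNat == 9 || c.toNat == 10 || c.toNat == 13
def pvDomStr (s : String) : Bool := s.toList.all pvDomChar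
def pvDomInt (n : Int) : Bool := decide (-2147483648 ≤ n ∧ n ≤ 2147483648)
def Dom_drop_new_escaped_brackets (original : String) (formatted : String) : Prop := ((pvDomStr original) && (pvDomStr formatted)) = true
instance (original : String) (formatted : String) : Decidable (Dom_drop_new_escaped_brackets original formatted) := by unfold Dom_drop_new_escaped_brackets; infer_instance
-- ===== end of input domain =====

-- B re-decomposes A's per-character scan as a recursion on the keep count using find/replace; alternative structure, same result.

-- ===== PORT A =====
-- A's inner while loop over text, transliterated as recursion on the character list.
-- The 'esc ≠ []' conjunct only guards termination; A is only ever called with esc = "\[" / "\]".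
def pvDropExtra (esc plain : List Char) : Int → List Char → List Char
  | _, [] => []
  | keep, c :: rest =>
    if h : esc ≠ [] ∧ esc.isPrefixOf (c :: rest) then
      if keep > 0 then
        esc ++ pvDropExtra esc plain (keep - 1) (List.drop esc.length (c :: rest))
      else
        plain ++ pvDropExtra esc plain keep (List.drop esc.length (c :: rest))
    else
      c :: pvDropExtra esc plain keep rest
termination_by _ t => t.length
decreasing_by
  · simp only [List.length_drop]
    have : esc.length ≥ 1 := List.length_pos_iff.mpr h.1
    simp; omega
  · simp only [List.length_drop]
    have : esc.length ≥ 1 := List.length_pos_iff.mpr h.1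
    simp; omega
  · simp

def drop_new_escaped_brackets (original : String) (formatted : String) : String :=
  let out1 := pvDropExtra "\\[".toList "[".toList (PySem.Str.count original "\\[" : Int) formatted.toList
  let out2 := pvDropExtra "\\]".toList "]".toList (PySem.Str.count original "\\]" : Int) out1
  String.ofList out2

-- ===== PORT B =====
-- B's convert: recursion on keep_count; text[:cut] / text[cut:] with 0 ≤ cut are exactly take/drop.
def pvConvert (esc plain : List Char) (keep : Int) (text : List Char) : List Char :=
  if keep ≤ 0 then
    PySem.Chars.replace text esc plain
  else
    let j := PySem.Chars.find text esc
    if j = -1 then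
      text
    else
      let cut := j.toNat + esc.length
      List.take cut text ++ pvConvert esc plain (keep - 1) (List.drop cut text)
termination_by keep.toNat
decreasing_by omega

def drop_new_escaped_brackets_alt (original : String) (formatted : String) : String :=
  let out1 := pvConvert "\\[".toList "[".toList (PySem.Str.count original "\\[" : Int) formatted.toList
  let out2 := pvConvert "\\]".toList "]".toList (PySem.Str.count original "\\]" : Int) out1
  String.ofList out2

-- ===== PRECONDITION & SPEC =====
def Spec_drop_new_escaped_brackets (original : String) (formatted : String) (out : String) : Prop := out = drop_new_escaped_brackets_alt original formatted
instance (original : String) (formatted : String) (out : String) : Decidable (Spec_drop_new_escaped_brackets original formatted out) := by unfold Spec_drop_new_escaped_brackets; infer_instance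

-- ===== CLAIM (what is proved, stated in full; the proofs are below) =====
def Claim_equal_drop_new_escaped_brackets : Prop := ∀ (original : String) (formatted : String), Dom_drop_new_escaped_brackets original formatted → Spec_drop_new_escaped_brackets original formatted (drop_new_escaped_brackets original formatted)

-- ===== LEMMAS AND PROOFS =====

-- With a non-positive keep counter A's scan never takes the 'keep' branch: it is replace.go's scan.
lemma pvDropExtra_go (esc plain : List Char) (hesc : esc ≠ []) (k : Int) (hk : k ≤ 0) :
    ∀ (fuel : Nat) (l acc : List Char), l.length ≤ fuel →
      PySem.Chars.replace.go esc plain fuel l acc = acc.reverse ++ pvDropExtra esc plain k l := by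
  intro fuel
  induction fuel with
  | zero =>
    intro l acc hl
    have : l = [] := List.eq_nil_of_length_eq_zero (Nat.le_zero.mp hl)
    subst this
    simp [PySem.Chars.replace.go, pvDropExtra]
  | succ n ih =>
    intro l acc hl
    match l with
    | [] => simp [PySem.Chars.replace.go, pvDropExtra]
    | c :: rest =>
      rw [PySem.Chars.replace.go]
      by_cases hpre : esc.isPrefixOf (c :: rest)
      · have hlen : esc.length ≥ 1 := List.length_pos_iff.mpr hesc
        rw [if_pos hpre,
            ih (List.drop esc.length (c :: rest)) _ (by
              simp only [List.length_drop, List.length_cons]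
              simp only [List.length_cons] at hl
              omega)]
        rw [pvDropExtra, dif_pos ⟨hesc, hpre⟩, if_neg (by omega)]
        simp
      · rw [if_neg hpre, ih rest (c :: acc) (by simpa using Nat.le_of_succ_le_succ hl)]
        rw [pvDropExtra, dif_neg (by simp [hpre])]
        simp

lemma pvDropExtra_nonpos (esc plain : List Char) (hesc : esc ≠ []) (k : Int) (hk : k ≤ 0)
    (t : List Char) :
    pvDropExtra esc plain k t = PySem.Chars.replace t esc plain := by
  rw [PySem.Chars.replace, if_neg (by simp [List.isEmpty_iff, hesc])]
  rw [pvDropExtra_go esc plain hesc k hk t.length t [] (le_refl _)]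
  simp

-- If esc occurs nowhere in t, A's scan copies t unchanged.
lemma pvDropExtra_no_occ (esc plain : List Char) (k : Int)
    (t : List Char) (h : ¬ esc <:+: t) :
    pvDropExtra esc plain k t = t := by
  induction t with
  | nil => simp [pvDropExtra]
  | cons c rest ih =>
    rw [pvDropExtra, dif_neg, ih]
    · intro hinf
      exact h (hinf.trans (List.suffix_cons c rest).isInfix)
    · intro ⟨_, hpre⟩
      exact h (List.IsPrefix.isInfix (List.isPrefixOf_iff_prefix.mp hpre))

-- Up to the first occurrence (at index j) A's scan copies characters, then consumes one kept esc.
lemma pvDropExtra_first_occ (esc plain : List Char) (hesc : esc ≠ []) (k : Int) (hk : k > 0) :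
    ∀ (j : Nat) (t : List Char), esc <+: t.drop j → (∀ i < j, ¬ esc <+: t.drop i) →
      pvDropExtra esc plain k t =
        List.take (j + esc.length) t ++ pvDropExtra esc plain (k - 1) (List.drop (j + esc.length) t) := by
  intro j
  induction j with
  | zero =>
    intro t hocc _
    simp only [List.drop_zero] at hocc
    obtain ⟨s, rfl⟩ := hocc
    match esc, hesc with
    | e :: es, hesc =>
      simp only [List.cons_append]
      rw [pvDropExtra, dif_pos ⟨hesc, List.isPrefixOf_iff_prefix.mpr ⟨s, by simp⟩⟩, if_pos hk]
      simp
  | succ j ih =>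
    intro t hocc hmin
    match t with
    | [] =>
      exact absurd (List.prefix_nil.mp (by simpa using hocc)) hesc
    | c :: rest =>
      have h0 : ¬ esc <+: (c :: rest) := by simpa using hmin 0 (Nat.succ_pos j)
      rw [pvDropExtra, dif_neg (by
        intro ⟨_, hpre⟩
        exact h0 (List.isPrefixOf_iff_prefix.mp hpre))]
      rw [ih rest (by simpa using hocc) (fun i hi => by simpa using hmin (i + 1) (by omega))]
      simp [Nat.succ_add]

-- Main equivalence of the two helpers.
lemma pvConvert_eq (esc plain : List Char) (hesc : esc ≠ []) :
    ∀ (n : Nat) (t : List Char), t.length ≤ n → ∀ (k : Int),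
      pvDropExtra esc plain k t = pvConvert esc plain k t := by
  intro n
  induction n with
  | zero =>
    intro t ht k
    have : t = [] := List.eq_nil_of_length_eq_zero (Nat.le_zero.mp ht)
    subst this
    by_cases hk : k ≤ 0
    · rw [pvConvert, if_pos hk, pvDropExtra_nonpos esc plain hesc k hk]
    · have hfind : PySem.Chars.find [] esc = -1 := by
        rw [PySem.Chars.find_eq_neg_one_iff]
        intro hinf
        exact hesc (List.infix_nil.mp hinf)
      rw [pvConvert, if_neg hk, if_pos hfind]
      simp [pvDropExtra]
  | succ n ih =>
    intro t ht k
    by_cases hk : k ≤ 0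
    · rw [pvConvert, if_pos hk, pvDropExtra_nonpos esc plain hesc k hk]
    · rw [pvConvert, if_neg hk]
      by_cases hj : PySem.Chars.find t esc = -1
      · rw [if_pos hj]
        exact pvDropExtra_no_occ esc plain k t ((PySem.Chars.find_eq_neg_one_iff _ _).mp hj)
      · rw [if_neg hj]
        have hpos : 0 ≤ PySem.Chars.find t esc :=
          (PySem.Chars.find_nonneg_iff _ _).mpr ((PySem.Chars.find_ne_neg_one_iff _ _).mp hj)
        obtain ⟨hocc, hmin⟩ := PySem.Chars.find_spec hpos
        rw [pvDropExtra_first_occ esc plain hesc k (by omega) (PySem.Chars.find t esc).toNat t hocc hmin]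
        congr 1
        have hlen : esc.length ≥ 1 := List.length_pos_iff.mpr hesc
        have hbound : (PySem.Chars.find t esc).toNat + esc.length ≤ t.length := by
          have := hocc.length_le
          simp at this
          omega
        exact ih _ (by simp; omega) (k - 1)

-- ===== VERDICT (by name: the statement is the Claim_ definition above) =====
theorem drop_new_escaped_brackets_spec : Claim_equal_drop_new_escaped_brackets := by
  intro original formatted _
  simp only [Spec_drop_new_escaped_brackets, drop_new_escaped_brackets,
             drop_new_escaped_brackets_alt]
  rw [pvConvert_eq _ _ (by decide) _ _ (le_refl _),
      pvConvert_eq _ _ (by decide) _ _ (le_refl _)]
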